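-- pv_equiv track=rewrite | github.com/kzahel/falcon-api | python/falcon_api/btcipher.py | wordsToBytes
-- ===== SOURCE A (Python) =====
-- def loglshift(val, n):
--     # logical left shift
--     shifted = val << n
--     if (1<<31) & shifted:
--         return shifted - (1<<32)
--     else:
--         return shifted
--
-- def rshift(val, n): return (val % 0x100000000) >> n # faster
--
-- def wordsToBytes(words):
--     bitmask = 1
--     for i in range(7): bitmask = (bitmask << 1) | 1
--     bytes = []
--     for i in range(len(words)):
--         bstart = i*4
--         for j in range(4):
--             #bytes[bstart+j] = (words[i] & (bitmask << (8*(3-j)))) >>> (8*(3-j))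
--             #bytes.append( (words[i] & (bitmask << (8*(3-j)))) >> (8*(3-j)) ) #XXX >>> does not exist
--             rval = loglshift(bitmask, (8*(3-j)))
--
--             val = words[i] & rval
--             bytes.append( rshift( val, 8*(3-j) ) )
--     return bytes
-- ===== SOURCE B (Python) =====
-- def wordsToBytes(words):
--     return [b for w in words for b in (w % 0x100000000).to_bytes(4, 'big')]
-- ===== Notes on version B (the rewrite author's own statement) =====
-- stated objective: idiomatic
-- what changed: Replaces the hand-built 0xFF mask loop, the loglshift/rshift helper arithmetic and the per-byte shift/mask inner loop with one comprehension that serializes each word as (w % 2**32).to_bytes(4, 'big').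
import Mathlib
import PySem

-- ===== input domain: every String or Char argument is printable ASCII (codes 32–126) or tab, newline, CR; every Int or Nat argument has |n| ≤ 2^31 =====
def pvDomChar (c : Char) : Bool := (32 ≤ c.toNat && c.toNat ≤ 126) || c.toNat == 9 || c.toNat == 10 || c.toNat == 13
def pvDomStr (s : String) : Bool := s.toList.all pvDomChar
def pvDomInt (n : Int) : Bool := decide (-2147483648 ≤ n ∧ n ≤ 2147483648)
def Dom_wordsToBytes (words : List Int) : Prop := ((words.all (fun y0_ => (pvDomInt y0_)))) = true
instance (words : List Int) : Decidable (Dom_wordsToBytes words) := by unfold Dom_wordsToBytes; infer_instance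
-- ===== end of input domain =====

-- B replaces A's hand-rolled mask building and per-byte shift/mask loop by serializing
-- each word with the library big-endian 4-byte conversion (idiomatic; measured constant-factor speedup).

-- ===== PORT A =====
def loglshift (val : Int) (n : Nat) : Int :=
  let shifted := val <<< n
  if PySem.Int.band ((1:Int) <<< (31:Nat)) shifted ≠ 0 then shifted - ((1:Int) <<< (32:Nat))
  else shifted

def rshift (val : Int) (n : Nat) : Int := (PySem.Int.mod val 0x100000000) >>> n

def wordsToBytes (words : List Int) : List Int :=
  let bitmask := (PySem.List.pyRange 0 7).foldl (fun b _ => PySem.Int.bor (b <<< (1:Nat)) 1) 1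
  (PySem.List.pyRange 0 (PySem.List.len words)).foldl (fun bytes i =>
    (PySem.List.pyRange 0 4).foldl (fun bytes j =>
      let rval := loglshift bitmask (8*(3-j)).toNat
      let val := PySem.Int.band (PySem.List.pyGetD words i 0) rval
      bytes ++ [rshift val (8*(3-j)).toNat]) bytes) []

-- ===== PORT B =====
-- exact hand port of (m).to_bytes(4, 'big') for 0 ≤ m < 2^32: the four big-endian base-256 digits
def toBytes4BE (m : Int) : List Int := [m / 16777216, m / 65536 % 256, m / 256 % 256, m % 256]

def wordsToBytes_alt (words : List Int) : List Int :=
  words.flatMap (fun w => toBytes4BE (PySem.Int.mod w 4294967296))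

-- ===== PRECONDITION & SPEC =====
def Spec_wordsToBytes (words : List Int) (out : List Int) : Prop := out = wordsToBytes_alt words
instance (words : List Int) (out : List Int) : Decidable (Spec_wordsToBytes words out) := by unfold Spec_wordsToBytes; infer_instance

-- ===== CLAIM (what is proved, stated in full; the proofs are below) =====
def Claim_equal_wordsToBytes : Prop := ∀ (words : List Int), Dom_wordsToBytes words → Spec_wordsToBytes words (wordsToBytes words)

-- ===== LEMMAS AND PROOFS =====

-- A's per-word inner loop body, with the computed bitmask 255 inlined
def blockA (x : Int) : List Int :=
  [rshift (PySem.Int.band x (loglshift 255 24)) 24,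
   rshift (PySem.Int.band x (loglshift 255 16)) 16,
   rshift (PySem.Int.band x (loglshift 255 8)) 8,
   rshift (PySem.Int.band x (loglshift 255 0)) 0]

lemma wordsToBytes_eq_flatMap (words : List Int) :
    wordsToBytes words = words.flatMap blockA := by
  unfold wordsToBytes
  have h7 : (PySem.List.pyRange 0 7).foldl (fun b _ => PySem.Int.bor (b <<< (1:Nat)) 1) 1 = 255 := by decide
  have h4 : PySem.List.pyRange 0 4 = [0, 1, 2, 3] := by decide
  simp only [h7, h4, List.foldl_cons, List.foldl_nil]
  have hbody : ∀ (bytes : List Int) (i : Int),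
      ((((bytes ++ [rshift (PySem.Int.band (PySem.List.pyGetD words i 0) (loglshift 255 (8*(3-(0:Int))).toNat)) (8*(3-(0:Int))).toNat])
        ++ [rshift (PySem.Int.band (PySem.List.pyGetD words i 0) (loglshift 255 (8*(3-(1:Int))).toNat)) (8*(3-(1:Int))).toNat])
        ++ [rshift (PySem.Int.band (PySem.List.pyGetD words i 0) (loglshift 255 (8*(3-(2:Int))).toNat)) (8*(3-(2:Int))).toNat])
        ++ [rshift (PySem.Int.band (PySem.List.pyGetD words i 0) (loglshift 255 (8*(3-(3:Int))).toNat)) (8*(3-(3:Int))).toNat])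
      = bytes ++ blockA (PySem.List.pyGetD words i 0) := by
    intro bytes i
    simp [blockA, List.append_assoc]
  simp only [hbody]
  rw [PySem.List.foldl_pyRange_pyGetD words 0 (fun acc x => acc ++ blockA x) [] (le_refl 0)]
  simp [List.flatMap_def]


lemma or_allones (m : Nat) (h : m < 16777216) : m ||| 16777215 = 16777215 := by
  apply Nat.eq_of_testBit_eq
  intro i
  rw [Nat.testBit_or]
  rw [show (16777215 : Nat) = 2^24 - 1 by norm_num, Nat.testBit_two_pow_sub_one]
  by_cases hi : i < 24
  · simp [hi]
  · have h24 : (16777216 : Nat) = 2^24 := by norm_num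
    have : m < 2^i := lt_of_lt_of_le (h24 ▸ h) (Nat.pow_le_pow_right (by norm_num) (by omega))
    simp [hi, Nat.testBit_lt_two_pow this]

lemma and_mod_8 (n : Nat) : n &&& 255 = n % 256 := by
  have h := Nat.and_two_pow_sub_one_eq_mod n 8
  norm_num at h
  exact h

lemma and_mod_16 (n : Nat) : n &&& 65535 = n % 65536 := by
  have h := Nat.and_two_pow_sub_one_eq_mod n 16
  norm_num at h
  exact h

lemma and_mod_24 (n : Nat) : n &&& 16777215 = n % 16777216 := by
  have h := Nat.and_two_pow_sub_one_eq_mod n 24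
  norm_num at h
  exact h

lemma and65280_div (n : Nat) : (n &&& 65280) / 256 = n / 256 % 256 := by
  have h : (n &&& 65280) >>> 8 = (n >>> 8) &&& ((65280:Nat) >>> 8) := Nat.shiftRight_and_distrib
  rw [show (65280:Nat) >>> 8 = 255 from rfl, and_mod_8,
      Nat.shiftRight_eq_div_pow, Nat.shiftRight_eq_div_pow] at h
  norm_num at h
  exact h

lemma and65280_mod (n : Nat) : (n &&& 65280) % 256 = 0 := by
  rw [← and_mod_8 (n &&& 65280), Nat.and_assoc, show (65280 &&& 255 : Nat) = 0 from rfl, Nat.and_zero]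

lemma and16711680_div (n : Nat) : (n &&& 16711680) / 65536 = n / 65536 % 256 := by
  have h : (n &&& 16711680) >>> 16 = (n >>> 16) &&& ((16711680:Nat) >>> 16) := Nat.shiftRight_and_distrib
  rw [show (16711680:Nat) >>> 16 = 255 from rfl, and_mod_8,
      Nat.shiftRight_eq_div_pow, Nat.shiftRight_eq_div_pow] at h
  norm_num at h
  exact h

lemma and16711680_mod (n : Nat) : (n &&& 16711680) % 65536 = 0 := by
  rw [← and_mod_16 (n &&& 16711680), Nat.and_assoc, show (16711680 &&& 65535 : Nat) = 0 from rfl, Nat.and_zero]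

lemma shift_mod (k s : Nat) :
    ((k:Int) % 4294967296) >>> s = ((k % 4294967296 / 2^s : Nat) : Int) := by
  have h1 : ((k % 4294967296 : Nat) : Int) = (k:Int) % 4294967296 := by push_cast; ring
  rw [← h1, ← Int.natCast_shiftRight, Nat.shiftRight_eq_div_pow]

lemma block_eq (w : Int) (h1 : -2147483648 ≤ w) (h2 : w ≤ 2147483648) :
    blockA w = toBytes4BE (PySem.Int.mod w 4294967296) := by
  have e24 : loglshift 255 24 = -16777216 := by decide
  have e16 : loglshift 255 16 = 16711680 := by decide
  have e8 : loglshift 255 8 = 65280 := by decide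
  have e0 : loglshift 255 0 = 255 := by decide
  have hmodall : ∀ a : Int, PySem.Int.mod a 4294967296 = a % 4294967296 :=
    fun a => PySem.Int.mod_eq_emod_of_pos (by norm_num)
  have s24 : ∀ k : Nat, ((k:Int) % 4294967296) >>> (24:Nat) = ((k % 4294967296 / 16777216 : Nat) : Int) := by
    intro k; rw [shift_mod]; norm_num
  have s16 : ∀ k : Nat, ((k:Int) % 4294967296) >>> (16:Nat) = ((k % 4294967296 / 65536 : Nat) : Int) := by
    intro k; rw [shift_mod]; norm_num
  have s8 : ∀ k : Nat, ((k:Int) % 4294967296) >>> (8:Nat) = ((k % 4294967296 / 256 : Nat) : Int) := by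
    intro k; rw [shift_mod]; norm_num
  have s0 : ∀ k : Nat, ((k:Int) % 4294967296) >>> (0:Nat) = ((k % 4294967296 : Nat) : Int) := by
    intro k; rw [shift_mod]; norm_num
  simp only [blockA, toBytes4BE, rshift, e24, e16, e8, e0, hmodall]
  by_cases hpos : (0:Int) ≤ w
  · obtain ⟨n, rfl⟩ : ∃ n : Nat, w = ↑n := ⟨w.toNat, (Int.toNat_of_nonneg hpos).symm⟩
    have hn : n ≤ 2147483648 := by omega
    have b255 : PySem.Int.band (n:Int) 255 = ((n &&& 255 : Nat) : Int) := by
      rw [show (255:Int) = ((255:Nat):Int) from rfl, PySem.Int.band_natCast]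
    have b65280 : PySem.Int.band (n:Int) 65280 = ((n &&& 65280 : Nat) : Int) := by
      rw [show (65280:Int) = ((65280:Nat):Int) from rfl, PySem.Int.band_natCast]
    have b16711680 : PySem.Int.band (n:Int) 16711680 = ((n &&& 16711680 : Nat) : Int) := by
      rw [show (16711680:Int) = ((16711680:Nat):Int) from rfl, PySem.Int.band_natCast]
    have bneg : PySem.Int.band (n:Int) (-16777216) = ((n - (n &&& 16777215) : Nat) : Int) := by
      have hnn : (0:Int) ≤ (n:Int) := Int.natCast_nonneg n
      simp [PySem.Int.band, hnn]
    simp only [b255, b65280, b16711680, bneg, s24, s16, s8, s0]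
    have f1 : n &&& 16777215 = n % 16777216 := and_mod_24 n
    have f2 : n &&& 255 = n % 256 := and_mod_8 n
    have g1 : (n &&& 65280) / 256 = n / 256 % 256 := and65280_div n
    have g2 : (n &&& 65280) % 256 = 0 := and65280_mod n
    have g3 : n &&& 65280 ≤ 65280 := Nat.and_le_right
    have g4 : (n &&& 16711680) / 65536 = n / 65536 % 256 := and16711680_div n
    have g5 : (n &&& 16711680) % 65536 = 0 := and16711680_mod n
    have g6 : n &&& 16711680 ≤ 16711680 := Nat.and_le_right
    simp only [List.cons.injEq, and_true]
    refine ⟨by omega, by omega, by omega, by omega⟩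
  · have hneg : w < 0 := by omega
    obtain ⟨n, rfl⟩ : ∃ n : Nat, w = -1 - ↑n := ⟨(-w-1).toNat, by omega⟩
    have hn : n < 2147483648 := by omega
    have b255 : PySem.Int.band (-1 - (n:Int)) 255 = ((255 - (255 &&& n) : Nat) : Int) := by
      simp [PySem.Int.band]
      omega
    have b65280 : PySem.Int.band (-1 - (n:Int)) 65280 = ((65280 - (65280 &&& n) : Nat) : Int) := by
      simp [PySem.Int.band]
      omega
    have b16711680 : PySem.Int.band (-1 - (n:Int)) 16711680 = ((16711680 - (16711680 &&& n) : Nat) : Int) := by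
      simp [PySem.Int.band]
      omega
    have bneg : PySem.Int.band (-1 - (n:Int)) (-16777216) = -((n ||| 16777215 : Nat) : Int) - 1 := by
      simp [PySem.Int.band]
      omega
    have ylt : n ||| 16777215 < 2147483648 := by
      have h31 : (2147483648 : Nat) = 2^31 := by norm_num
      rw [h31]
      exact Nat.or_lt_two_pow (h31 ▸ hn) (by norm_num)
    have ymod : (n ||| 16777215) % 16777216 = 16777215 := by
      rw [← and_mod_24, Nat.and_or_distrib_right, and_mod_24, Nat.and_self,
          or_allones _ (Nat.mod_lt n (by norm_num))]
    have ydiv : (n ||| 16777215) / 16777216 = n / 16777216 := by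
      have h := Nat.shiftRight_or_distrib (a := n) (b := 16777215) (i := 24)
      rw [show (16777215:Nat) >>> 24 = 0 from rfl, Nat.or_zero,
          Nat.shiftRight_eq_div_pow, Nat.shiftRight_eq_div_pow] at h
      norm_num at h
      exact h
    have m24 : ((-(((n ||| 16777215 : Nat)):Int) - 1) % 4294967296) >>> (24:Nat)
        = (((4294967295 - (n ||| 16777215)) / 16777216 : Nat) : Int) := by
      rw [show ((-(((n ||| 16777215 : Nat)):Int) - 1) % 4294967296) = (((4294967295 - (n ||| 16777215) : Nat)) : Int) from by omega,
          ← Int.natCast_shiftRight, Nat.shiftRight_eq_div_pow]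
    have c255 : 255 &&& n = n % 256 := by rw [Nat.and_comm]; exact and_mod_8 n
    have c65280d : (65280 &&& n) / 256 = n / 256 % 256 := by rw [Nat.and_comm]; exact and65280_div n
    have c65280m : (65280 &&& n) % 256 = 0 := by rw [Nat.and_comm]; exact and65280_mod n
    have c65280l : 65280 &&& n ≤ 65280 := Nat.and_le_left
    have c167d : (16711680 &&& n) / 65536 = n / 65536 % 256 := by rw [Nat.and_comm]; exact and16711680_div n
    have c167m : (16711680 &&& n) % 65536 = 0 := by rw [Nat.and_comm]; exact and16711680_mod n
    have c167l : 16711680 &&& n ≤ 16711680 := Nat.and_le_left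
    simp only [b255, b65280, b16711680, bneg, m24, s16, s8, s0]
    simp only [List.cons.injEq, and_true]
    refine ⟨by omega, by omega, by omega, by omega⟩

theorem wordsToBytes_spec : Claim_equal_wordsToBytes := by
  intro words hdom
  unfold Spec_wordsToBytes wordsToBytes_alt
  rw [wordsToBytes_eq_flatMap]
  induction words with
  | nil => rfl
  | cons w ws ih =>
    simp only [Dom_wordsToBytes, List.all_cons, Bool.and_eq_true, pvDomInt, decide_eq_true_eq] at hdom
    simp only [List.flatMap_cons]
    rw [block_eq w hdom.1.1 hdom.1.2, ih hdom.2]
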